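-- pv_equiv track=rewrite | github.com/cfrant01/bn-sketches-pipeline | src/traces_to_sketch_properties.py | chain_to_formula
-- ===== SOURCE A (Python) =====
-- from typing import Iterable, List, Sequence, Tuple, TypeVar
--
-- def state_to_hctl_formula(state: Sequence[int], genes: Sequence[str]) -> str:
--     if len(state) != len(genes):
--         raise ValueError("State length does not match genes length.")
--     literals = [gene if bit == 1 else f"~{gene}" for gene, bit in zip(genes, state)]
--     return "(" + " & ".join(literals) + ")"
--
-- def chain_to_formula(states: Sequence[Tuple[int, ...]], genes: Sequence[str]) -> str:
--     if len(states) < 2: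
--         raise ValueError("Trace chain needs at least 2 states.")
--     encoded = [state_to_hctl_formula(state, genes) for state in states]
--     inner = encoded[-1]
--     for state in reversed(encoded[:-1]):
--         inner = f"{state} & EF({inner})"
--     return f"3{{x}}: ( @{{x}}: ( {inner} ) )"
-- ===== SOURCE B (Python) =====
-- def state_to_hctl_formula(state, genes):
--     if len(state) != len(genes):
--         raise ValueError("State length does not match genes length.")
--     literals = [gene if bit == 1 else f"~{gene}" for gene, bit in zip(genes, state)]
--     return "(" + " & ".join(literals) + ")"
--
--
-- def chain_to_formula(states, genes):
--     if len(states) < 2: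
--         raise ValueError("Trace chain needs at least 2 states.")
--     encoded = [state_to_hctl_formula(state, genes) for state in states]
--     parts = [f"{state} & EF(" for state in encoded[:-1]]
--     parts.append(encoded[-1])
--     body = "".join(parts) + ")" * (len(encoded) - 1)
--     return f"3{{x}}: ( @{{x}}: ( {body} ) )"
-- ===== Notes on version B (the rewrite author's own statement) =====
-- stated objective: faster
-- what changed: Replaces the reversed-accumulator loop that rebuilds the nested string at every step with a single forward pass that collects 'state & EF(' fragments, the last state and the closing parentheses, joined once.
import Mathlib
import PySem

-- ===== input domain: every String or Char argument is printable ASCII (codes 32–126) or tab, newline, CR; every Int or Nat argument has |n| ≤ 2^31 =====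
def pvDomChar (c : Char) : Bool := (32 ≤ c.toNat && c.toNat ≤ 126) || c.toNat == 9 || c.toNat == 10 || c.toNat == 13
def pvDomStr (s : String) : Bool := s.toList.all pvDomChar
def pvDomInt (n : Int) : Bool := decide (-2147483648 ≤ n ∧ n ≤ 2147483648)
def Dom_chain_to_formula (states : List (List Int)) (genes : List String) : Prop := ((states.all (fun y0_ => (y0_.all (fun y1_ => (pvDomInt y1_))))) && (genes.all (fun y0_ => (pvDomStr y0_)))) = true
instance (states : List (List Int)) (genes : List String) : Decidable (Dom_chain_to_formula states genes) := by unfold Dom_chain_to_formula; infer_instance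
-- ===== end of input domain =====

-- B builds the nested HCTL string in one forward pass (fragments joined once) instead of A's
-- reversed-accumulator loop that re-wraps the whole string at every step; same value on Pre_.

-- ===== PORT A =====
-- shared helper: state_to_hctl_formula (identical in Source A and Source B).
-- Python raises ValueError on a length mismatch; Pre_ excludes that, "" stands for the raise.
def stateToHctl (state : List Int) (genes : List String) : String :=
  if state.length ≠ genes.length then ""
  else
    let literals := (genes.zip state).map (fun gb => if gb.2 == 1 then gb.1 else "~" ++ gb.1)
    "(" ++ PySem.Str.join " & " literals ++ ")"

def chain_to_formula (states : List (List Int)) (genes : List String) : String :=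
  if states.length < 2 then ""  -- ValueError in Python; excluded by Pre_
  else
    let encoded := states.map (fun s => stateToHctl s genes)
    let inner0 := (PySem.List.pyGet? encoded (-1)).getD ""   -- encoded[-1]; nonempty under the guard
    let inner := (PySem.List.slice encoded none (some (-1))).reverse.foldl
        (fun inner state => state ++ " & EF(" ++ inner ++ ")") inner0
    "3{x}: ( @{x}: ( " ++ inner ++ " ) )"

-- ===== PORT B =====
def chain_to_formula_alt (states : List (List Int)) (genes : List String) : String :=
  if states.length < 2 then ""  -- ValueError in Python; excluded by Pre_
  else
    let encoded := states.map (fun s => stateToHctl s genes)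
    let parts := (PySem.List.slice encoded none (some (-1))).map (fun s => s ++ " & EF(")
      ++ [(PySem.List.pyGet? encoded (-1)).getD ""]
    -- ")" * (len(encoded) - 1) ported by hand as a replicate (exact: Python string repetition)
    let body := PySem.Str.join "" parts ++ String.ofList (List.replicate (encoded.length - 1) ')')
    "3{x}: ( @{x}: ( " ++ body ++ " ) )"

-- ===== PRECONDITION & SPEC =====
-- Pre_: the chain has at least 2 states and every state matches the gene count;
-- otherwise Python A raises ValueError (B raises too).
def Pre_chain_to_formula (states : List (List Int)) (genes : List String) : Prop :=
  2 ≤ states.length ∧ ∀ s ∈ states, s.length = genes.length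
instance (states : List (List Int)) (genes : List String) : Decidable (Pre_chain_to_formula states genes) := by unfold Pre_chain_to_formula; infer_instance

def pvWitness_chain_to_formula : List (List Int) × List String :=
  ([[1, 0], [0, 1]], ["g1", "g2"])

def Spec_chain_to_formula (states : List (List Int)) (genes : List String) (out : String) : Prop := out = chain_to_formula_alt states genes
instance (states : List (List Int)) (genes : List String) (out : String) : Decidable (Spec_chain_to_formula states genes out) := by unfold Spec_chain_to_formula; infer_instance

-- ===== CLAIM (what is proved, stated in full; the proofs are below) =====
def Claim_equal_chain_to_formula : Prop := ∀ (states : List (List Int)) (genes : List String), Dom_chain_to_formula states genes → Pre_chain_to_formula states genes → Spec_chain_to_formula states genes (chain_to_formula states genes)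

-- ===== LEMMAS AND PROOFS =====

-- the empty-separator join is plain concatenation
lemma join_empty (parts : List String) :
    PySem.Str.join "" parts = String.ofList (parts.map String.toList).flatten := by
  have key : ∀ (ps : List (List Char)), PySem.Chars.join [] ps = ps.flatten := by
    intro ps
    induction ps with
    | nil => rfl
    | cons p rest ih =>
      cases rest with
      | nil => simp [PySem.Chars.join, List.intercalate]
      | cons q r =>
        rw [PySem.Chars.join_cons_cons, ih]
        simp
  simp [PySem.Str.join, key]

-- A's reversed-accumulator loop equals B's one-pass fragment layout
lemma fold_eq_join (pre : List String) (z : String) :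
    pre.reverse.foldl (fun inner s => s ++ " & EF(" ++ inner ++ ")") z
      = PySem.Str.join "" (pre.map (· ++ " & EF(") ++ [z])
          ++ String.ofList (List.replicate pre.length ')') := by
  induction pre generalizing z with
  | nil => simp [join_empty]
  | cons p ps ih =>
    rw [List.reverse_cons, List.foldl_append]
    simp only [List.foldl_cons, List.foldl_nil, ih, join_empty]
    apply String.toList_injective
    simp [List.replicate_succ']

lemma pyGet_neg_one {α : Type} (l : List α) (h : l ≠ []) :
    PySem.List.pyGet? l (-1) = some (l.getLast h) := by
  have hl : 0 < l.length := List.length_pos_iff.mpr h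
  have h1 : 1 ≤ l.length := hl
  simp only [PySem.List.pyGet?, PySem.List.pyIdx?]
  norm_num [h1]
  rw [List.getLast_eq_getElem, List.getElem?_eq_getElem (by omega)]

-- ===== VERDICT (by name: the statement is the Claim_ definition above) =====
theorem chain_to_formula_spec : Claim_equal_chain_to_formula := by
  intro states genes _ hpre
  obtain ⟨hlen, -⟩ := hpre
  unfold Spec_chain_to_formula chain_to_formula chain_to_formula_alt
  have hguard : ¬ states.length < 2 := by omega
  simp only [hguard, if_false]
  have hne : states.map (fun s => stateToHctl s genes) ≠ [] := by
    simp; intro h; simp [h] at hlen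
  set enc := states.map (fun s => stateToHctl s genes) with henc
  rw [PySem.List.slice_to_neg_one, pyGet_neg_one enc hne]
  simp only [Option.getD_some]
  rw [fold_eq_join, List.length_dropLast]
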